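-- pv_equiv track=rewrite | github.com/mgbec/aibom2 | aibom_agent/services/comparison_engine.py | _find_unique_components
-- ===== SOURCE A (Python) =====
-- from typing import List, Dict, Any, Set
--
-- def _find_unique_components(all_components: Dict[str, List[Dict[str, Any]]]) -> Dict[str, List[Dict[str, Any]]]:
--     """Find components that are unique to each model."""
--     unique_components = {}
--
--     # Get all component names across all models
--     all_comp_names = set()
--     model_comp_names = {}
--
--     for model_name, components in all_components.items():
--         comp_names = {comp.get('name', '') for comp in components}
--         model_comp_names[model_name] = comp_names
--         all_comp_names.update(comp_names)
--
--     # Find unique components for each model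
--     for model_name, components in all_components.items():
--         unique_to_model = []
--
--         for comp in components:
--             comp_name = comp.get('name', '')
--
--             # Check if this component exists in other models
--             is_unique = True
--             for other_model, other_comp_names in model_comp_names.items():
--                 if other_model != model_name and comp_name in other_comp_names:
--                     is_unique = False
--                     break
--
--             if is_unique:
--                 unique_to_model.append(comp)
--
--         unique_components[model_name] = unique_to_model
--
--     return unique_components
-- ===== SOURCE B (Python) =====
-- def _find_unique_components(all_components):
--     """Find components that are unique to each model."""
--     # name -> number of distinct models containing a component of that name
--     model_count = {}
--     for components in all_components.values():
--         for name in {comp.get('name', '') for comp in components}: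
--             model_count[name] = model_count.get(name, 0) + 1
--     return {
--         model_name: [comp for comp in components
--                      if model_count.get(comp.get('name', ''), 0) == 1]
--         for model_name, components in all_components.items()
--     }
-- ===== Notes on version B (the rewrite author's own statement) =====
-- stated objective: alternative
-- what changed: Replaces A's per-component scan over every other model's name set with a precomputed counter mapping each name to the number of distinct models containing it, so the uniqueness test becomes a single lookup (count == 1); Pre_ only requires the model names (dict keys) to be pairwise distinct, which every Python dict satisfies.
import Mathlib
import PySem

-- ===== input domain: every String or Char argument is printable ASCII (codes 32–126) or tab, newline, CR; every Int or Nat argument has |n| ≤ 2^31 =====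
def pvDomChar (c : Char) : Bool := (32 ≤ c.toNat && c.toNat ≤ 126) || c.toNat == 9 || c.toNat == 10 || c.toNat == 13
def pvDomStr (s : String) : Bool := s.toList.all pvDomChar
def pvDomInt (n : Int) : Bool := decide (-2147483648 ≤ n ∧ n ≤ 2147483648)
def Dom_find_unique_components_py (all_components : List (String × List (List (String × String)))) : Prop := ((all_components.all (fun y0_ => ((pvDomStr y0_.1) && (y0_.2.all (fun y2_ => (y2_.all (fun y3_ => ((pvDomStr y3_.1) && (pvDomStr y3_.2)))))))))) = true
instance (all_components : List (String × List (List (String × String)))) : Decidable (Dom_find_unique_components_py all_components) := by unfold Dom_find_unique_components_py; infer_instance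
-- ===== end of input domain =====

-- B replaces A's per-component scan over every other model's name set by a precomputed
-- counter (name → number of distinct models containing it) and a single filter pass (objective: alternative).

-- comp.get('name', '')   (shared by both Pythons verbatim)
def pvName (comp : List (String × String)) : String :=
  (PySem.Dict.ofList comp).getD "name" ""

-- ===== PORT A =====
def find_unique_components_py (all_components : List (String × List (List (String × String)))) : List (String × List (List (String × String))) :=
  -- first loop: all_comp_names (never read afterwards) and model_comp_names
  let st : PySem.Set String × PySem.Dict String (List String) :=
    all_components.foldl
      (fun st mc =>
        let comp_names : PySem.Set String := PySem.Set.ofList (mc.2.map pvName)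
        (PySem.Set.update st.1 comp_names, st.2.insert mc.1 comp_names))
      (PySem.Set.empty, PySem.Dict.empty)
  let model_comp_names := st.2
  -- second loop
  let unique_components : PySem.Dict String (List (List (String × String))) :=
    all_components.foldl
      (fun uc mc =>
        let unique_to_model := mc.2.foldl
          (fun acc comp =>
            let comp_name := pvName comp
            -- 'for other_model, other_comp_names in …: if …: is_unique = False; break'
            let is_unique := model_comp_names.items.foldl
              (fun ok p => if p.1 != mc.1 && PySem.Set.contains p.2 comp_name then false else ok)
              true
            if is_unique then acc ++ [comp] else acc)
          []
        uc.insert mc.1 unique_to_model)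
      PySem.Dict.empty
  unique_components.items

-- ===== PORT B =====
def find_unique_components_py_alt (all_components : List (String × List (List (String × String)))) : List (String × List (List (String × String))) :=
  let model_count : PySem.Dict String Int :=
    all_components.foldl
      (fun d mc =>
        (PySem.Set.ofList (mc.2.map pvName)).foldl
          (fun d name => d.insert name (d.getD name 0 + 1)) d)
      PySem.Dict.empty
  all_components.map
    (fun mc => (mc.1, mc.2.filter (fun comp => model_count.getD (pvName comp) 0 == 1)))

-- ===== PRECONDITION & SPEC =====
-- Pre_ requires the model names (outer dict keys) to be pairwise distinct: the association
-- list stands for a Python dict, whose keys are necessarily unique; A returns on every dict.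
def Pre_find_unique_components_py (all_components : List (String × List (List (String × String)))) : Prop :=
  (all_components.map Prod.fst).Nodup
instance (all_components : List (String × List (List (String × String)))) : Decidable (Pre_find_unique_components_py all_components) := by unfold Pre_find_unique_components_py; infer_instance

def pvWitness_find_unique_components_py : (List (String × List (List (String × String)))) :=
  [("model_a", [[("name", "x"), ("version", "1")], [("name", "y")]]),
   ("model_b", [[("name", "y")]])]

def Spec_find_unique_components_py (all_components : List (String × List (List (String × String)))) (out : List (String × List (List (String × String)))) : Prop := out = find_unique_components_py_alt all_components
instance (all_components : List (String × List (List (String × String)))) (out : List (String × List (List (String × String)))) : Decidable (Spec_find_unique_components_py all_components out) := by unfold Spec_find_unique_components_py; infer_instance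

-- ===== CLAIM (what is proved, stated in full; the proofs are below) =====
def Claim_equal_find_unique_components_py : Prop := ∀ (all_components : List (String × List (List (String × String)))), Dom_find_unique_components_py all_components → Pre_find_unique_components_py all_components → Spec_find_unique_components_py all_components (find_unique_components_py all_components)

-- ===== LEMMAS AND PROOFS =====

-- counter lemma
theorem pv_count_getD (acs : List (String × List (List (String × String)))) (d : PySem.Dict String Int) (n : String) :
  (acs.foldl (fun d mc => (PySem.Set.ofList (mc.2.map pvName)).foldl (fun d name => d.insert name (d.getD name 0 + 1)) d) d).getD n 0
  = d.getD n 0 + (acs.countP (fun mc => (PySem.Set.ofList (mc.2.map pvName) : List String).contains n) : Int) := by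
  induction acs generalizing d with
  | nil => simp
  | cons hd tl ih =>
    simp only [List.foldl_cons, ih, PySem.Dict.getD_foldl_insert_add_one, List.countP_cons]
    have hnd : (PySem.Set.ofList (hd.2.map pvName) : List String).Nodup := PySem.Set.nodup_ofList _
    by_cases h : n ∈ (PySem.Set.ofList (hd.2.map pvName) : List String)
    · rw [List.count_eq_one_of_mem hnd h]
      simp [h]; ring
    · rw [List.count_eq_zero_of_not_mem h]
      simp [h]

theorem pv_count_core {α : Type} (q : α → Bool) (f : α → String) (m : String) (x : α)
    (hq : q x = true) (hx1 : f x = m) :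
    ∀ acs : List α, (acs.map f).Nodup → x ∈ acs →
      acs.countP q = 1 + acs.countP (fun mc => (f mc != m) && q mc) := by
  intro acs
  induction acs with
  | nil => simp
  | cons hd tl ih =>
    intro hnd hmem
    simp only [List.map_cons, List.nodup_cons] at hnd
    obtain ⟨hhd, htl⟩ := hnd
    rcases List.mem_cons.mp hmem with rfl | hmemtl
    · have hx : ∀ mc ∈ tl, f mc ≠ m := by
        intro mc hmc hem
        exact hhd (hx1 ▸ hem ▸ List.mem_map_of_mem hmc)
      have hcongr : tl.countP q = tl.countP (fun mc => (f mc != m) && q mc) := by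
        apply List.countP_congr
        intro mc hmc
        simp [hx mc hmc]
      simp [hq, hx1, hcongr]
      omega
    · have hne : f hd ≠ m := by
        intro h
        exact hhd (h ▸ hx1 ▸ List.mem_map_of_mem hmemtl)
      rw [List.countP_cons, List.countP_cons, ih htl hmemtl]
      simp [hne]
      omega


-- the is_unique test equals the count-equals-one test, pointwise
theorem pv_pointwise (acs : List (String × List (List (String × String))))
    (hpre : (acs.map Prod.fst).Nodup)
    (mc : String × List (List (String × String))) (hmc : mc ∈ acs)
    (comp : List (String × String)) (hcomp : comp ∈ mc.2) :
    (!(acs.map (fun mc' => (mc'.1, (PySem.Set.ofList (mc'.2.map pvName) : List String)))).any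
        (fun p => p.1 != mc.1 && PySem.Set.contains p.2 (pvName comp)))
    = ((0 : Int) + (acs.countP (fun mc' => (PySem.Set.ofList (mc'.2.map pvName) : List String).contains (pvName comp)) : Int) == 1) := by
  set n := pvName comp with hn
  have hqx : (PySem.Set.ofList (mc.2.map pvName) : List String).contains n = true := by
    simpa using (PySem.Set.mem_ofList (mc.2.map pvName) n).mpr (List.mem_map_of_mem hcomp)
  have hcount := pv_count_core
      (q := fun mc' => (PySem.Set.ofList (mc'.2.map pvName) : List String).contains n)
      (f := Prod.fst) (m := mc.1) (x := mc) hqx rfl acs hpre hmc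
  beta_reduce at hcount
  rw [List.any_map]
  simp only [Function.comp_def]
  set c1 := acs.countP (fun mc' => (PySem.Set.ofList (mc'.2.map pvName) : List String).contains n) with hc1
  set c2 := acs.countP (fun mc' => mc'.1 != mc.1 && (PySem.Set.ofList (mc'.2.map pvName) : List String).contains n) with hc2
  by_cases h : acs.any (fun mc' => mc'.1 != mc.1 && (PySem.Set.ofList (mc'.2.map pvName) : List String).contains n) = true
  · rw [h]
    have hpos : 0 < c2 := by
      obtain ⟨a, ha, hpa⟩ := List.any_eq_true.mp h
      rw [hc2]
      exact (List.countP_pos_iff).mpr ⟨a, ha, hpa⟩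
    symm
    simp only [Bool.not_true]
    rw [beq_eq_false_iff_ne]
    omega
  · rw [Bool.not_eq_true] at h
    rw [h]
    have hz : c2 = 0 := by
      rw [hc2, List.countP_eq_zero]
      intro a ha hpa
      exact absurd hpa (by simpa using List.any_eq_false.mp h a ha)
    symm
    simp only [Bool.not_false]
    rw [beq_iff_eq]
    omega

theorem pv_main (acs : List (String × List (List (String × String))))
    (hpre : (acs.map Prod.fst).Nodup) :
    find_unique_components_py acs = find_unique_components_py_alt acs := by
  unfold find_unique_components_py find_unique_components_py_alt
  simp only []
  rw [PySem.List.foldl_prod_mk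
      (f := fun (s : PySem.Set String) (mc : String × List (List (String × String))) => PySem.Set.update s (PySem.Set.ofList (mc.2.map pvName)))
      (g := fun (d : PySem.Dict String (List String)) (mc : String × List (List (String × String))) => d.insert mc.1 (PySem.Set.ofList (mc.2.map pvName)))]
  have hfresh : ∀ a ∈ acs, (PySem.Dict.empty : PySem.Dict String (List String)).contains a.1 = false := by
    intro a _; simp
  have hnodup : (acs.map (fun mc => mc.1)).Nodup := hpre
  have hmcn : (acs.foldl (fun (d : PySem.Dict String (List String)) (mc : String × List (List (String × String))) => d.insert mc.1 (PySem.Set.ofList (mc.2.map pvName))) PySem.Dict.empty).items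
      = acs.map (fun mc => (mc.1, (PySem.Set.ofList (mc.2.map pvName) : List String))) := by
    rw [PySem.Dict.items_foldl_insert_fresh acs (fun mc => mc.1) _ PySem.Dict.empty hfresh hnodup]
    rw [show (PySem.Dict.empty : PySem.Dict String (List String)).items = [] from rfl]
    simp
  simp only [hmcn]
  have hfresh2 : ∀ a ∈ acs, (PySem.Dict.empty : PySem.Dict String (List (List (String × String)))).contains a.1 = false := by
    intro a _; simp
  rw [PySem.Dict.items_foldl_insert_fresh acs (fun mc => mc.1) _ PySem.Dict.empty hfresh2 hnodup]
  simp only [PySem.List.foldl_if_false_eq, Bool.true_and, PySem.List.foldl_append_if_eq_filter,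
    List.nil_append]
  rw [show (PySem.Dict.empty : PySem.Dict String (List (List (String × String)))).items = [] from rfl, List.nil_append]
  apply List.map_congr_left
  intro mc hmc
  refine Prod.ext rfl ?_
  simp only []
  apply List.filter_congr
  intro comp hcomp
  rw [pv_count_getD acs PySem.Dict.empty (pvName comp)]
  rw [PySem.Dict.getD_empty]
  exact pv_pointwise acs hpre mc hmc comp hcomp

-- ===== VERDICT (by name: the statement is the Claim_ definition above) =====
theorem find_unique_components_py_spec : Claim_equal_find_unique_components_py := by
  intro acs _ hpre
  unfold Spec_find_unique_components_py
  exact pv_main acs hpre
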